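-- pv_equiv track=rewrite | github.com/polirritmico/codesignal_solutions | Python/beautifulText.py | solution
-- ===== SOURCE A (Python) =====
-- def solution(input_str: str, min_limit: int, max_limit: int) -> bool:
--     len_input_str = len(input_str)
--     for width in range(min_limit, max_limit + 1):
--         newline_offset = 0
--         for line in range(1, len_input_str):
--             position = width * line + newline_offset
--             if position >= len_input_str or input_str[position] != " ":
--                 break
--             if len_input_str - position == width + 1:
--                 return True
--             newline_offset += 1
--     return False
-- ===== SOURCE B (Python) =====
-- def solution(input_str: str, min_limit: int, max_limit: int) -> bool:
--     # A width w works iff d = w+1 divides len+1 and the string decomposes into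
--     # chunks of length w separated by single spaces; enumerate the divisor
--     # strides d by trial division up to sqrt(len+1), then verify each candidate
--     # by repeatedly peeling one chunk + separator off the front.
--     L = len(input_str) + 1
--     strides = []
--     i = 1
--     while i * i <= L:
--         if L % i == 0:
--             strides.extend((i, L // i))
--         i += 1
--
--     def lines_ok(s, d):
--         # d divides len(s)+1 here; peel chunks of d-1 chars + one space
--         while len(s) + 1 > d:
--             if s[d - 1] != " ":
--                 return False
--             s = s[d:]
--         return True
--
--     return any(
--         2 <= d < L and min_limit + 1 <= d <= max_limit + 1 and lines_ok(input_str, d)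
--         for d in strides
--     )
-- ===== Notes on version B (the rewrite author's own statement) =====
-- stated objective: faster
-- what changed: Instead of trying every width in [min_limit, max_limit] and walking separator positions with an offset accumulator, B enumerates candidate strides d = width+1 as divisors of len+1 by trial division up to sqrt(len+1) and verifies each candidate by recursively peeling one chunk plus its separating space off the front of the string.
-- outside the precondition, e.g. on solution('ab', -2, -2): A returns False, B returns False
import Mathlib
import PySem

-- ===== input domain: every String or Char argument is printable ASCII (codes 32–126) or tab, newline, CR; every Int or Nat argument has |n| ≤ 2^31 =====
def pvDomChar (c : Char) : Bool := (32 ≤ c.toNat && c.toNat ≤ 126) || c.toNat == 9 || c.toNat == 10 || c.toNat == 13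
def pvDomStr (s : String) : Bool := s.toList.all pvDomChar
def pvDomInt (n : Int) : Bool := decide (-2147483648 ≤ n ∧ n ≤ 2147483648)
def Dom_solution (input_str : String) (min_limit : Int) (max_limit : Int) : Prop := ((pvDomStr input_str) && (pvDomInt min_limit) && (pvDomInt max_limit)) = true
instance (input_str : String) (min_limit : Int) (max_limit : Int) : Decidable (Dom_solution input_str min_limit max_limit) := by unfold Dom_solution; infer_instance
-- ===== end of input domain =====

-- B replaces A's scan over every candidate width by trial-division divisor enumeration of
-- len+1 (strides d = width+1) plus a chunk-peeling verifier; equivalence of return values is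
-- proved on Pre_solution (A raises IndexError via negative indexing for widths ≤ -2 on
-- strings of length ≥ 2).


-- ===== PORT A =====
-- inner `for line in range(1, len_input_str)` loop as a counter loop, with
-- `newline_offset` as accumulator; fuel = number of remaining range elements
def solInner (chars : List Char) (n w : Int) (line off : Int) : Nat → Bool
  | 0 => false
  | fuel + 1 =>
    let pos := w * line + off
    -- `pyGet? = none` is Python raising IndexError (index < -len, outside Pre_solution),
    -- folded into the break test `position >= len or input_str[position] != " "`
    if n ≤ pos ∨ PySem.List.pyGet? chars pos ≠ some ' ' then false
    else if n - pos = w + 1 then true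
    else solInner chars n w (line + 1) (off + 1) fuel

-- outer `for width in range(min_limit, max_limit + 1)` loop; `return True` propagates
def solOuter (chars : List Char) (n : Int) (w : Int) : Nat → Bool
  | 0 => false
  | fuel + 1 =>
    if solInner chars n w 1 0 (n - 1).toNat then true
    else solOuter chars n (w + 1) fuel

def solution (input_str : String) (min_limit : Int) (max_limit : Int) : Bool :=
  let chars := input_str.toList
  let n : Int := PySem.List.len chars
  solOuter chars n min_limit (max_limit + 1 - min_limit).toNat

-- ===== PORT B =====
-- the `while i * i <= L` trial-division loop; fuel bounds the iteration count (i ≤ L always)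
def collectStrides (L : Nat) : Nat → Nat → List Nat
  | 0, _ => []
  | fuel + 1, i =>
    if i * i ≤ L then
      (if L % i = 0 then [i, L / i] else []) ++ collectStrides L fuel (i + 1)
    else []

-- the `while len(s) + 1 > d` chunk-peeling loop of lines_ok; fuel = initial length suffices
def linesOkLoop (d : Nat) : Nat → List Char → Bool
  | 0, s => decide (s.length + 1 ≤ d)
  | fuel + 1, s =>
    if d < s.length + 1 then
      if s.getD (d - 1) '!' == ' ' then linesOkLoop d fuel (s.drop d) else false
    else true

def linesOk (d : Nat) (s : List Char) : Bool := linesOkLoop d s.length s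

def solution_alt (input_str : String) (min_limit : Int) (max_limit : Int) : Bool :=
  let chars := input_str.toList
  let L := chars.length + 1
  let strides := collectStrides L (L + 1) 1
  strides.any fun d =>
    decide (2 ≤ d) && decide (d < L) &&
      decide (min_limit + 1 ≤ (d : Int)) && decide ((d : Int) ≤ max_limit + 1) &&
      linesOk d chars

-- ===== PRECONDITION & SPEC =====
-- Pre_ excludes widths ≤ -2 on strings of length ≥ 2: there Python A indexes the string at
-- negative positions (wraparound) and raises IndexError as soon as the walk goes below -len;
-- inputs of that shape on which A happens to return before raising are excluded with it.
def Pre_solution (input_str : String) (min_limit : Int) (max_limit : Int) : Prop :=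
  max_limit < min_limit ∨ -1 ≤ min_limit ∨ input_str.toList.length ≤ 1
instance (input_str : String) (min_limit : Int) (max_limit : Int) : Decidable (Pre_solution input_str min_limit max_limit) := by unfold Pre_solution; infer_instance

def pvWitness_solution : String × Int × Int := ("a b", 1, 3)

def Spec_solution (input_str : String) (min_limit : Int) (max_limit : Int) (out : Bool) : Prop := out = solution_alt input_str min_limit max_limit
instance (input_str : String) (min_limit : Int) (max_limit : Int) (out : Bool) : Decidable (Spec_solution input_str min_limit max_limit out) := by unfold Spec_solution; infer_instance

-- ===== CLAIM (what is proved, stated in full; the proofs are below) =====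
def Claim_equal_solution : Prop := ∀ (input_str : String) (min_limit : Int) (max_limit : Int), Dom_solution input_str min_limit max_limit → Pre_solution input_str min_limit max_limit → Spec_solution input_str min_limit max_limit (solution input_str min_limit max_limit)

-- ===== LEMMAS AND PROOFS =====

-- widths ≤ -1 can never satisfy the success test n - pos = w + 1 (pos < n forces n - pos ≥ 1)
lemma solInner_neg (chars : List Char) (n w : Int) (hw : w + 1 ≤ 0) :
    ∀ (fuel : Nat) (line off : Int), solInner chars n w line off fuel = false := by
  intro fuel
  induction fuel with
  | zero => intro line off; rfl
  | succ fuel ih =>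
    intro line off
    simp only [solInner]
    by_cases hbr : n ≤ w * line + off ∨ PySem.List.pyGet? chars (w * line + off) ≠ some ' '
    · rw [if_pos hbr]
    · push_neg at hbr
      rw [if_neg (by push_neg; exact ⟨hbr.1, hbr.2⟩),
        if_neg (by omega : ¬ (n - (w * line + off) = w + 1))]
      exact ih (line + 1) (off + 1)

-- width 0: the success test pos = n - 1 is never reached (positions stay ≤ n - 2)
lemma solInner_zero (chars : List Char) :
    ∀ (m : Nat) (a : Int), 1 ≤ a → ((chars.length : Int) - a).toNat = m →
      solInner chars (chars.length : Int) 0 a (a - 1) m = false := by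
  intro m
  induction m with
  | zero =>
    intro a ha hm
    rfl
  | succ m ih =>
    intro a ha hm
    simp only [solInner]
    by_cases hbr : (chars.length : Int) ≤ 0 * a + (a - 1) ∨
        PySem.List.pyGet? chars (0 * a + (a - 1)) ≠ some ' '
    · rw [if_pos hbr]
    · rw [if_neg hbr, if_neg (by omega : ¬ ((chars.length : Int) - (0 * a + (a - 1)) = 0 + 1))]
      have hoff : a - 1 + 1 = a + 1 - 1 := by ring
      rw [hoff]
      exact ih (a + 1) (by omega) (by omega)

-- characterization of A's inner loop for widths ≥ 1
lemma solInner_pos (chars : List Char) (w : Int) (hw : 1 ≤ w) :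
    ∀ (m : Nat) (a : Int), 1 ≤ a → ((chars.length : Int) - a).toNat = m →
      (solInner chars (chars.length : Int) w a (a - 1) m = true ↔
        ∃ k : Int, a ≤ k ∧ (w + 1) * (k + 1) = (chars.length : Int) + 1 ∧
          ∀ j : Int, a ≤ j → j ≤ k → PySem.List.pyGet? chars ((w + 1) * j - 1) = some ' ') := by
  intro m
  induction m with
  | zero =>
    intro a ha hm
    simp only [solInner, Bool.false_eq_true, false_iff]
    rintro ⟨k, hak, hkeq, -⟩
    have h1 : (w + 1) * (k + 1) ≥ 2 * (k + 1) := by nlinarith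
    omega
  | succ m ih =>
    intro a ha hm
    simp only [solInner]
    have hpv : w * a + (a - 1) = (w + 1) * a - 1 := by ring
    by_cases hbr : (chars.length : Int) ≤ w * a + (a - 1) ∨
        PySem.List.pyGet? chars (w * a + (a - 1)) ≠ some ' '
    · rw [if_pos hbr]
      simp only [Bool.false_eq_true, false_iff]
      rintro ⟨k, hak, hkeq, hsp⟩
      have hspa := hsp a (le_refl a) hak
      rw [show (w + 1) * a - 1 = w * a + (a - 1) by ring] at hspa
      rcases hbr with hbig | hne
      · have h1 : (w + 1) * (k + 1) ≥ (w + 1) * (a + 1) := by nlinarith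
        have h2 : (w + 1) * (a + 1) = (w + 1) * a + (w + 1) := by ring
        omega
      · exact hne hspa
    · push_neg at hbr
      obtain ⟨hpos, hget⟩ := hbr
      rw [if_neg (by push_neg; exact ⟨hpos, hget⟩)]
      by_cases hsucc : (chars.length : Int) - (w * a + (a - 1)) = w + 1
      · rw [if_pos hsucc]
        simp only [true_iff, iff_true]
        refine ⟨a, le_refl a, ?_, ?_⟩
        · have h2 : (w + 1) * (a + 1) = (w + 1) * a + (w + 1) := by ring
          omega
        · intro j hj1 hj2
          have hja : j = a := le_antisymm hj2 hj1
          subst hja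
          rw [show (w + 1) * j - 1 = w * j + (j - 1) by ring]
          exact hget
      · rw [if_neg hsucc]
        have hoff : a - 1 + 1 = a + 1 - 1 := by ring
        rw [hoff, ih (a + 1) (by omega) (by omega)]
        constructor
        · rintro ⟨k, hak, hkeq, hsp⟩
          refine ⟨k, by omega, hkeq, ?_⟩
          intro j hj1 hj2
          by_cases hja : j = a
          · subst hja
            rw [show (w + 1) * j - 1 = w * j + (j - 1) by ring]
            exact hget
          · exact hsp j (by omega) hj2
        · rintro ⟨k, hak, hkeq, hsp⟩
          have hka : k ≠ a := by
            intro hka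
            subst hka
            have h2 : (w + 1) * (k + 1) = (w + 1) * k + (w + 1) := by ring
            omega
          exact ⟨k, by omega, hkeq, fun j hj1 hj2 => hsp j (by omega) hj2⟩

-- the outer fuel loop as an existential over the widths it visits
lemma solOuter_iff (chars : List Char) (n : Int) :
    ∀ (fuel : Nat) (w0 : Int), solOuter chars n w0 fuel = true ↔
      ∃ w : Int, w0 ≤ w ∧ w < w0 + (fuel : Int) ∧
        solInner chars n w 1 0 (n - 1).toNat = true := by
  intro fuel
  induction fuel with
  | zero =>
    intro w0
    simp only [solOuter, Bool.false_eq_true, false_iff]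
    rintro ⟨w, h1, h2, -⟩
    omega
  | succ fuel ih =>
    intro w0
    simp only [solOuter]
    by_cases hin : solInner chars n w0 1 0 (n - 1).toNat = true
    · rw [if_pos hin]
      simp only [true_iff]
      exact ⟨w0, le_refl w0, by omega, hin⟩
    · rw [if_neg hin, ih (w0 + 1)]
      constructor
      · rintro ⟨w, h1, h2, h3⟩
        exact ⟨w, by omega, by omega, h3⟩
      · rintro ⟨w, h1, h2, h3⟩
        have hne : w ≠ w0 := fun h => hin (h ▸ h3)
        exact ⟨w, by omega, by omega, h3⟩

-- A as an existential over widths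
lemma solution_eq_exists (s : String) (mn mx : Int) :
    solution s mn mx = true ↔ ∃ w : Int, mn ≤ w ∧ w < mx + 1 ∧
      solInner s.toList (s.toList.length : Int) w 1 0
        ((s.toList.length : Int) - 1).toNat = true := by
  simp only [solution, PySem.List.len_eq]
  rw [solOuter_iff]
  constructor
  · rintro ⟨w, h1, h2, h3⟩; exact ⟨w, h1, by omega, h3⟩
  · rintro ⟨w, h1, h2, h3⟩; exact ⟨w, h1, by omega, h3⟩

-- the trial-division loop collects exactly the i / L-div-i pairs with i*i ≤ L, L % i = 0
lemma mem_collectStrides (L : Nat) :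
    ∀ (fuel i d : Nat), 1 ≤ i → L < i + fuel →
      (d ∈ collectStrides L fuel i ↔
        ∃ k : Nat, i ≤ k ∧ k * k ≤ L ∧ L % k = 0 ∧ (d = k ∨ d = L / k)) := by
  intro fuel
  induction fuel with
  | zero =>
    intro i d hi hL
    simp only [collectStrides, List.not_mem_nil, false_iff]
    rintro ⟨k, hik, hkk, -, -⟩
    nlinarith
  | succ fuel ih =>
    intro i d hi hL
    simp only [collectStrides]
    by_cases hii : i * i ≤ L
    · rw [if_pos hii]
      rw [List.mem_append, ih (i + 1) d (by omega) (by omega)]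
      constructor
      · rintro (hfst | ⟨k, hik, hkk, hmod, hdk⟩)
        · by_cases hm : L % i = 0
          · rw [if_pos hm] at hfst
            simp only [List.mem_cons, List.not_mem_nil, or_false] at hfst
            exact ⟨i, le_refl i, hii, hm, hfst⟩
          · rw [if_neg hm] at hfst
            exact absurd hfst (List.not_mem_nil)
        · exact ⟨k, by omega, hkk, hmod, hdk⟩
      · rintro ⟨k, hik, hkk, hmod, hdk⟩
        by_cases hki : k = i
        · subst hki
          left
          rw [if_pos hmod]
          simp only [List.mem_cons, List.not_mem_nil, or_false]
          exact hdk
        · right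
          exact ⟨k, by omega, hkk, hmod, hdk⟩
    · rw [if_neg hii]
      simp only [List.not_mem_nil, false_iff]
      rintro ⟨k, hik, hkk, -, -⟩
      have : i * i ≤ k * k := Nat.mul_le_mul hik hik
      omega
  -- nlinarith use in zero case handled above

-- the strides list holds exactly the divisors of L (for L ≥ 1)
lemma mem_strides_iff (L d : Nat) (hL : 1 ≤ L) :
    d ∈ collectStrides L (L + 1) 1 ↔ 1 ≤ d ∧ d ∣ L := by
  rw [mem_collectStrides L (L + 1) 1 d (le_refl 1) (by omega)]
  constructor
  · rintro ⟨k, hk1, hkk, hmod, hdk⟩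
    have hkdvd : k ∣ L := Nat.dvd_of_mod_eq_zero hmod
    rcases hdk with rfl | rfl
    · exact ⟨hk1, hkdvd⟩
    · refine ⟨?_, Nat.div_dvd_of_dvd hkdvd⟩
      have hkL : k ≤ L := by nlinarith
      have h1 : 1 ≤ L / k := (Nat.one_le_div_iff (by omega)).mpr hkL
      omega
  · rintro ⟨hd1, hdvd⟩
    by_cases hdd : d * d ≤ L
    · exact ⟨d, hd1, hdd, Nat.mod_eq_zero_of_dvd hdvd, Or.inl rfl⟩
    · have hdL : d ≤ L := Nat.le_of_dvd (by omega) hdvd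
      refine ⟨L / d, ?_, ?_, ?_, Or.inr ?_⟩
      · have h1 : 1 ≤ L / d := (Nat.one_le_div_iff (by omega)).mpr hdL
        omega
      · have h1 : L / d ≤ d := by
          by_contra hcon
          push_neg at hcon
          have : d * (d + 1) ≤ d * (L / d) := Nat.mul_le_mul_left d hcon
          have h2 : d * (L / d) = L := Nat.mul_div_cancel' hdvd
          nlinarith
        calc L / d * (L / d) ≤ d * (L / d) := Nat.mul_le_mul_right _ h1
          _ = L := Nat.mul_div_cancel' hdvd
      · exact Nat.mod_eq_zero_of_dvd (Nat.div_dvd_of_dvd hdvd)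
      · rw [Nat.div_div_self hdvd (by omega)]

-- the chunk-peeling loop checks exactly the separator slots d*j - 1
lemma linesOkLoop_iff (d : Nat) (hd : 2 ≤ d) :
    ∀ (fuel : Nat) (s : List Char), s.length ≤ fuel → d ∣ s.length + 1 →
      (linesOkLoop d fuel s = true ↔
        ∀ j : Nat, 1 ≤ j → j < (s.length + 1) / d → s.getD (d * j - 1) '!' = ' ') := by
  intro fuel
  induction fuel with
  | zero =>
    intro s hlen hdvd
    have hs0 : s.length = 0 := by omega
    rw [hs0] at hdvd
    have hd1 : d ≤ 1 := Nat.le_of_dvd (by omega) hdvd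
    exact absurd hd1 (by omega)
  | succ fuel ih =>
    intro s hlen hdvd
    simp only [linesOkLoop]
    by_cases hds : d < s.length + 1
    · rw [if_pos hds]
      have hq2 : 2 ≤ (s.length + 1) / d := by
        have h2d : 2 * d ≤ s.length + 1 := by
          rcases hdvd with ⟨c, hc⟩
          have : 2 ≤ c := by nlinarith
          nlinarith
        calc 2 = 2 * d / d := by rw [Nat.mul_div_cancel _ (by omega)]
          _ ≤ (s.length + 1) / d := Nat.div_le_div_right h2d
      by_cases hsp : s.getD (d - 1) '!' = ' '
      · rw [if_pos (by simpa using hsp)]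
        have hdrop : (s.drop d).length = s.length - d := List.length_drop
        obtain ⟨c, hc⟩ := hdvd
        have hstep : s.length - d + 1 = d * (c - 1) := by
          rw [Nat.mul_sub, mul_one]
          omega
        have hdvd' : d ∣ (s.drop d).length + 1 := by
          rw [hdrop, hstep]
          exact ⟨c - 1, rfl⟩
        rw [ih (s.drop d) (by rw [hdrop]; omega) hdvd']
        have hqdrop : ((s.drop d).length + 1) / d = (s.length + 1) / d - 1 := by
          rw [hdrop, hstep, hc, Nat.mul_div_cancel_left _ (by omega : 0 < d),
            Nat.mul_div_cancel_left _ (by omega : 0 < d)]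
        have hbridge : ∀ j : Nat, 1 ≤ j →
            (s.drop d).getD (d * j - 1) '!' = s.getD (d * (j + 1) - 1) '!' := by
          intro j hj
          rw [List.getD_eq_getElem?_getD, List.getD_eq_getElem?_getD, List.getElem?_drop]
          have hm : d * (j + 1) = d * j + d := by ring
          have h1 : 1 ≤ d * j := Nat.one_le_iff_ne_zero.mpr (Nat.mul_ne_zero (by omega) (by omega))
          rw [show d + (d * j - 1) = d * (j + 1) - 1 by omega]
        constructor
        · intro hall j hj1 hjlt
          by_cases hj : j = 1
          · subst hj
            simpa using hsp
          · have := hall (j - 1) (by omega) (by omega)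
            rw [hbridge (j - 1) (by omega), show j - 1 + 1 = j by omega] at this
            exact this
        · intro hall j hj1 hjlt
          rw [hbridge j hj1]
          exact hall (j + 1) (by omega) (by rw [hqdrop] at hjlt; omega)
      · rw [if_neg (by simpa using hsp)]
        simp only [Bool.false_eq_true, false_iff]
        intro hall
        exact hsp (by simpa using hall 1 (le_refl 1) (by omega))
    · rw [if_neg hds]
      simp only [true_iff, iff_true]
      intro j hj1 hjlt
      have hdeq : d = s.length + 1 := Nat.le_antisymm (Nat.le_of_dvd (by omega) hdvd) (by omega)
      rw [hdeq, Nat.div_self (by omega)] at hjlt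
      omega

-- B as an existential over separator strides
lemma solution_alt_eq_exists (s : String) (mn mx : Int) :
    solution_alt s mn mx = true ↔ ∃ d : Nat, 2 ≤ d ∧ d < s.toList.length + 1 ∧
      (s.toList.length + 1) % d = 0 ∧ mn + 1 ≤ (d : Int) ∧ (d : Int) ≤ mx + 1 ∧
      ∀ j : Nat, 1 ≤ j → j < (s.toList.length + 1) / d →
        s.toList.getD (d * j - 1) '!' = ' ' := by
  simp only [solution_alt, List.any_eq_true, Bool.and_eq_true, decide_eq_true_eq]
  constructor
  · rintro ⟨d, hmem, ⟨⟨⟨hd2, hdL⟩, hmn⟩, hmx⟩, hok⟩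
    have hdvd := ((mem_strides_iff (s.toList.length + 1) d (by omega)).mp hmem).2
    refine ⟨d, hd2, hdL, Nat.mod_eq_zero_of_dvd hdvd, hmn, hmx, ?_⟩
    exact (linesOkLoop_iff d hd2 s.toList.length s.toList (le_refl _) hdvd).mp hok
  · rintro ⟨d, hd2, hdL, hmod, hmn, hmx, hsp⟩
    have hdvd : d ∣ s.toList.length + 1 := Nat.dvd_of_mod_eq_zero hmod
    refine ⟨d, (mem_strides_iff (s.toList.length + 1) d (by omega)).mpr ⟨by omega, hdvd⟩,
      ⟨⟨⟨hd2, hdL⟩, hmn⟩, hmx⟩, ?_⟩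
    exact (linesOkLoop_iff d hd2 s.toList.length s.toList (le_refl _) hdvd).mpr hsp

-- index bookkeeping between the Int position (w+1)*j - 1 and the Nat position d*j - 1
lemma cast_sep_index (d j : Nat) (h : 1 ≤ d * j) :
    (d : Int) * (j : Int) - 1 = ((d * j - 1 : Nat) : Int) := by
  rw [Nat.cast_sub h, Nat.cast_mul]; ring

-- the two existential characterizations agree (main case: min_limit ≥ -1)
lemma main_iff (chars : List Char) (mn mx : Int) (hmn : -1 ≤ mn) (hn1 : 1 ≤ chars.length) :
    (∃ w : Int, mn ≤ w ∧ w < mx + 1 ∧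
        solInner chars (chars.length : Int) w 1 0 ((chars.length : Int) - 1).toNat = true) ↔
      (∃ d : Nat, 2 ≤ d ∧ d < chars.length + 1 ∧ (chars.length + 1) % d = 0 ∧
        mn + 1 ≤ (d : Int) ∧ (d : Int) ≤ mx + 1 ∧
        ∀ j : Nat, 1 ≤ j → j < (chars.length + 1) / d → chars.getD (d * j - 1) '!' = ' ') := by
  constructor
  · rintro ⟨w, h1, h2, ht⟩
    by_cases hw1 : 1 ≤ w
    · have hchar := solInner_pos chars w hw1 ((chars.length : Int) - 1).toNat 1 (by omega) rfl
      rw [show (1 : Int) - 1 = 0 by norm_num] at hchar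
      rw [hchar] at ht
      obtain ⟨k, hk1, hkeq, hsp⟩ := ht
      set d : Nat := (w + 1).toNat with hd
      have hdc : (d : Int) = w + 1 := Int.toNat_of_nonneg (by omega)
      set kn : Nat := k.toNat with hkn
      have hknc : (kn : Int) = k := Int.toNat_of_nonneg (by omega)
      have hLeq : d * (kn + 1) = chars.length + 1 := by
        have hc : ((d * (kn + 1) : Nat) : Int) = ((chars.length + 1 : Nat) : Int) := by
          push_cast [hdc, hknc]
          linarith [hkeq]
        exact_mod_cast hc
      have hd2 : 2 ≤ d := by omega
      have hdlt : d < chars.length + 1 := by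
        have h2d : d * 2 ≤ d * (kn + 1) := Nat.mul_le_mul_left d (by omega)
        omega
      have hdiv : (chars.length + 1) / d = kn + 1 := by
        rw [← hLeq, Nat.mul_div_cancel_left _ (by omega)]
      refine ⟨d, hd2, hdlt, by rw [← hLeq]; exact Nat.mul_mod_right d (kn + 1),
        by omega, by omega, ?_⟩
      intro j hj1 hjlt
      rw [hdiv] at hjlt
      have hjk : (j : Int) ≤ k := by omega
      have hsome := hsp (j : Int) (by exact_mod_cast hj1) hjk
      have h1dj : 1 ≤ d * j := Nat.one_le_iff_ne_zero.mpr (Nat.mul_ne_zero (by omega) (by omega))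
      rw [show (w + 1) * (j : Int) - 1 = (d : Int) * (j : Int) - 1 by rw [hdc],
        cast_sep_index d j h1dj, PySem.List.pyGet?_natCast] at hsome
      rw [List.getD_eq_getElem?_getD, hsome]
      rfl
    · exfalso
      have hw' : w = -1 ∨ w = 0 := by omega
      rcases hw' with h | h
      · subst h
        rw [solInner_neg chars (chars.length : Int) (-1) (by omega)] at ht
        exact absurd ht (by simp)
      · subst h
        have h0 := solInner_zero chars ((chars.length : Int) - 1).toNat 1 (by omega) rfl
        rw [show (1 : Int) - 1 = 0 by norm_num] at h0
        rw [h0] at ht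
        exact absurd ht (by simp)
  · rintro ⟨d, hd2, hdlt, hmod, hge, hle, hsp⟩
    have hdvd : d ∣ chars.length + 1 := Nat.dvd_of_mod_eq_zero hmod
    set q : Nat := (chars.length + 1) / d with hq
    have hqeq : d * q = chars.length + 1 := Nat.mul_div_cancel' hdvd
    have hq2 : 2 ≤ q := by
      by_contra hcon
      push_neg at hcon
      interval_cases q <;> omega
    refine ⟨(d : Int) - 1, by omega, by omega, ?_⟩
    have hchar := solInner_pos chars ((d : Int) - 1) (by omega)
      ((chars.length : Int) - 1).toNat 1 (by omega) rfl
    rw [show (1 : Int) - 1 = 0 by norm_num] at hchar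
    rw [hchar]
    refine ⟨(q : Int) - 1, by omega, ?_, ?_⟩
    · have hc : ((d * q : Nat) : Int) = ((chars.length + 1 : Nat) : Int) := by
        exact_mod_cast hqeq
      push_cast at hc
      nlinarith [hc]
    · intro j hj1 hjk
      set jn : Nat := j.toNat with hjn
      have hjnc : (jn : Int) = j := Int.toNat_of_nonneg (by omega)
      have hjn1 : 1 ≤ jn := by omega
      have hjnq : jn < q := by omega
      have hgd := hsp jn hjn1 hjnq
      rw [List.getD_eq_getElem?_getD] at hgd
      have hsome : chars[d * jn - 1]? = some ' ' := by
        cases hcase : chars[d * jn - 1]? with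
        | none => rw [hcase] at hgd; simp at hgd
        | some cc =>
          rw [hcase] at hgd
          simp only [Option.getD_some] at hgd
          rw [hgd]
      have h1dj : 1 ≤ d * jn := Nat.one_le_iff_ne_zero.mpr (Nat.mul_ne_zero (by omega) (by omega))
      rw [show ((d : Int) - 1 + 1) * j - 1 = (d : Int) * (jn : Int) - 1 by rw [hjnc]; ring,
        cast_sep_index d jn h1dj, PySem.List.pyGet?_natCast]
      exact hsome

-- ===== VERDICT (by name: the statement is the Claim_ definition above) =====
theorem solution_spec : Claim_equal_solution := by
  unfold Claim_equal_solution
  intro s mn mx _ hpre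
  unfold Spec_solution
  rw [Bool.eq_iff_iff, solution_eq_exists, solution_alt_eq_exists]
  by_cases hmm : mx < mn
  · constructor
    · rintro ⟨w, h1, h2, -⟩; omega
    · rintro ⟨d, -, -, -, h4, h5, -⟩; omega
  by_cases hlen : s.toList.length ≤ 1
  · constructor
    · rintro ⟨w, -, -, ht⟩
      rw [show ((s.toList.length : Int) - 1).toNat = 0 by omega] at ht
      simp [solInner] at ht
    · rintro ⟨d, h2, h3, -⟩; omega
  have hmn : -1 ≤ mn := by
    rcases hpre with h | h | h
    · omega
    · exact h
    · omega
  exact main_iff s.toList mn mx hmn (by omega)
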